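-- pv_equiv track=rewrite | github.com/haolunc/ARC-RL | reference_solutions/solutions/5521c0d9.py | transform
-- ===== SOURCE A (Python) =====
-- def transform(grid):
--
--     h = len(grid)
--     w = len(grid[0]) if h else 0
--
--     result = [[0] * w for _ in range(h)]
--
--     colour_cells = {}
--     for r in range(h):
--         for c in range(w):
--             val = grid[r][c]
--             if val != 0:
--                 colour_cells.setdefault(val, []).append((r, c))
--
--     for val, cells in colour_cells.items():
--         rows = [r for r, _ in cells]
--         min_r = min(rows)
--         max_r = max(rows)
--         height = max_r - min_r + 1
--
--         for r, col in cells: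
--             new_r = r - height
--             if 0 <= new_r < h:
--                 result[new_r][col] = val
--
--     return result
-- ===== SOURCE B (Python) =====
-- def transform(grid):
--     h = len(grid)
--     w = len(grid[0]) if h else 0
--
--     # One pass: per-colour (min_r, max_r) bounding rows, colours kept in
--     # first-appearance order by the dict itself; no per-cell lists stored.
--     bounds = {}
--     for r in range(h):
--         for c in range(w):
--             val = grid[r][c]
--             if val != 0:
--                 mn, mx = bounds.get(val, (r, r))
--                 bounds[val] = (min(mn, r), max(mx, r))
--
--     result = [[0] * w for _ in range(h)]
--     # For each colour (first-appearance order) rescan the grid row-major,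
--     # reproducing A's exact write order without stored cell lists.
--     for val, (mn, mx) in bounds.items():
--         height = mx - mn + 1
--         for r in range(h):
--             for c in range(w):
--                 if grid[r][c] == val:
--                     new_r = r - height
--                     if 0 <= new_r < h:
--                         result[new_r][c] = val
--     return result
-- ===== Notes on version B (the rewrite author's own statement) =====
-- stated objective: alternative
-- what changed: B keeps only a per-colour (min_r, max_r) bounds dict built in one pass instead of storing every cell per colour, then for each colour (first-appearance order) rescans the grid row-major to place its cells, reproducing A's exact write order with O(C) extra memory instead of O(cells).
import Mathlib
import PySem

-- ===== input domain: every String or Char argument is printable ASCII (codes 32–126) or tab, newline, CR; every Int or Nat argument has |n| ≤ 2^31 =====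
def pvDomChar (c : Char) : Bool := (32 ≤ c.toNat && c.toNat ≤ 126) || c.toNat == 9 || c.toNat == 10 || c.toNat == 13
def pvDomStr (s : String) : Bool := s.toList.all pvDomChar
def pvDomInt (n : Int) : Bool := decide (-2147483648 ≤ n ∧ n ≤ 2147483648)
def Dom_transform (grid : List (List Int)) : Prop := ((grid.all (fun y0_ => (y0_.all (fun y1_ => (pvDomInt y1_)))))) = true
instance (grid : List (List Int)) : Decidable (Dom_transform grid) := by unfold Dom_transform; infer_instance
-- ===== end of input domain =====

-- B keeps only per-colour (min_r, max_r) bounds (one pass) instead of per-colour cell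
-- lists, then rescans the grid row-major once per colour to place cells; same results.

-- result[i][j] = v  (shared 2D write helper; the guards keep the indices in range)
def pvSetCell (res : List (List Int)) (i j : Nat) (v : Int) : List (List Int) :=
  res.set i ((res.getD i []).set j v)

-- ===== PORT A =====
def transform (grid : List (List Int)) : List (List Int) :=
  let h := grid.length
  let w := if h ≠ 0 then (grid.headD []).length else 0
  let result := List.replicate h (List.replicate w (0 : Int))
  -- colour_cells: setdefault(val, []).append((r, c))  =  modify val [] (· ++ [(r, c)])
  let cc : PySem.Dict Int (List (Nat × Nat)) :=
    (List.range h).foldl (fun d r =>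
      (List.range w).foldl (fun d c =>
        let val := (grid.getD r []).getD c 0
        if val ≠ 0 then d.modify val [] (· ++ [(r, c)]) else d) d) PySem.Dict.empty
  cc.items.foldl (fun result (p : Int × List (Nat × Nat)) =>
    let rows := p.2.map Prod.fst
    -- rows is never empty (every stored cell list is nonempty), so min()/max() cannot raise
    let min_r := (PySem.List.min? rows (fun x => x)).getD 0
    let max_r := (PySem.List.max? rows (fun x => x)).getD 0
    let height : Int := (max_r : Int) - (min_r : Int) + 1
    p.2.foldl (fun result rc =>
      let new_r : Int := (rc.1 : Int) - height
      if 0 ≤ new_r ∧ new_r < (h : Int) then pvSetCell result new_r.toNat rc.2 p.1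
      else result) result) result

-- ===== PORT B =====
def transform_alt (grid : List (List Int)) : List (List Int) :=
  let h := grid.length
  let w := if h ≠ 0 then (grid.headD []).length else 0
  -- bounds: mn, mx = bounds.get(val, (r, r)); bounds[val] = (min(mn, r), max(mx, r))
  let bounds : PySem.Dict Int (Nat × Nat) :=
    (List.range h).foldl (fun d r =>
      (List.range w).foldl (fun d c =>
        let val := (grid.getD r []).getD c 0
        if val ≠ 0 then d.modify val (r, r) (fun m => (Nat.min m.1 r, Nat.max m.2 r))
        else d) d) PySem.Dict.empty
  let result := List.replicate h (List.replicate w (0 : Int))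
  bounds.items.foldl (fun result (p : Int × (Nat × Nat)) =>
    let height : Int := (p.2.2 : Int) - (p.2.1 : Int) + 1
    (List.range h).foldl (fun res r =>
      (List.range w).foldl (fun res c =>
        if (grid.getD r []).getD c 0 = p.1 then
          let new_r : Int := (r : Int) - height
          if 0 ≤ new_r ∧ new_r < (h : Int) then pvSetCell res new_r.toNat c p.1
          else res
        else res) res) result) result

-- ===== PRECONDITION & SPEC =====
-- Pre_ excludes ragged grids whose first row is longer than some later row: there
-- Python A raises IndexError on grid[r][c] (and Python B raises the same way).
def Pre_transform (grid : List (List Int)) : Prop :=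
  ∀ row ∈ grid, (grid.headD []).length ≤ row.length
instance (grid : List (List Int)) : Decidable (Pre_transform grid) := by
  unfold Pre_transform; infer_instance

def pvWitness_transform : List (List Int) := [[1, 0, 2], [0, 1, 0], [2, 0, 0]]

def Spec_transform (grid : List (List Int)) (out : List (List Int)) : Prop := out = transform_alt grid
instance (grid : List (List Int)) (out : List (List Int)) : Decidable (Spec_transform grid out) := by unfold Spec_transform; infer_instance

-- ===== CLAIM (what is proved, stated in full; the proofs are below) =====
def Claim_equal_transform : Prop := ∀ (grid : List (List Int)), Dom_transform grid → Pre_transform grid → Spec_transform grid (transform grid)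

-- ===== LEMMAS AND PROOFS =====

-- width of the grid, as both ports compute it
def pvW (grid : List (List Int)) : Nat :=
  if grid.length ≠ 0 then (grid.headD []).length else 0

-- the nonzero cells of the grid in row-major order, as (value, r, c)
def pvCells (grid : List (List Int)) : List (Int × Nat × Nat) :=
  (List.range grid.length).flatMap (fun r =>
    (List.range (pvW grid)).filterMap (fun c =>
      let v := (grid.getD r []).getD c 0
      if v ≠ 0 then some (v, r, c) else none))

-- min/max of the row indices of a nonempty cell list
def pvMinR (cs : List (Nat × Nat)) : Nat :=
  match cs with
  | [] => 0
  | x :: t => (t.map Prod.fst).foldl Nat.min x.1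
def pvMaxR (cs : List (Nat × Nat)) : Nat :=
  match cs with
  | [] => 0
  | x :: t => (t.map Prod.fst).foldl Nat.max x.1

-- relation between A's dict entries and B's
def pvF (e : Int × List (Nat × Nat)) : Int × (Nat × Nat) :=
  (e.1, (pvMinR e.2, pvMaxR e.2))

-- A's per-colour body (the lambda of A's second loop, heights written via pvW-free h)
def pvBodyA (grid : List (List Int)) (result : List (List Int)) (p : Int × List (Nat × Nat)) : List (List Int) :=
  let rows := p.2.map Prod.fst
  let min_r := (PySem.List.min? rows (fun x => x)).getD 0
  let max_r := (PySem.List.max? rows (fun x => x)).getD 0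
  let height : Int := (max_r : Int) - (min_r : Int) + 1
  p.2.foldl (fun result rc =>
    let new_r : Int := (rc.1 : Int) - height
    if 0 ≤ new_r ∧ new_r < (grid.length : Int) then pvSetCell result new_r.toNat rc.2 p.1
    else result) result

-- B's per-colour body
def pvBodyB (grid : List (List Int)) (result : List (List Int)) (p : Int × (Nat × Nat)) : List (List Int) :=
  let height : Int := (p.2.2 : Int) - (p.2.1 : Int) + 1
  (List.range grid.length).foldl (fun res r =>
    (List.range (pvW grid)).foldl (fun res c =>
      if (grid.getD r []).getD c 0 = p.1 then
        if 0 ≤ (r : Int) - height ∧ (r : Int) - height < (grid.length : Int) then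
          pvSetCell res ((r : Int) - height).toNat c p.1
        else res
      else res) res) result

-- A's / B's dict-building steps
def pvStepA (d : PySem.Dict Int (List (Nat × Nat))) (p : Int × Nat × Nat) : PySem.Dict Int (List (Nat × Nat)) :=
  d.modify p.1 [] (· ++ [(p.2.1, p.2.2)])
def pvStepB (d : PySem.Dict Int (Nat × Nat)) (p : Int × Nat × Nat) : PySem.Dict Int (Nat × Nat) :=
  d.modify p.1 (p.2.1, p.2.1) (fun m => (Nat.min m.1 p.2.1, Nat.max m.2 p.2.1))

def pvDictA (grid : List (List Int)) : PySem.Dict Int (List (Nat × Nat)) :=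
  (pvCells grid).foldl pvStepA PySem.Dict.empty

-- any nested cell loop over the grid equals a flat fold over pvCells
theorem pvFlatten {δ : Type} (grid : List (List Int)) (g : δ → Int × Nat × Nat → δ) (init : δ) :
    (List.range grid.length).foldl (fun d r =>
      (List.range (pvW grid)).foldl (fun d c =>
        let val := (grid.getD r []).getD c 0
        if val ≠ 0 then g d (val, r, c) else d) d) init
    = (pvCells grid).foldl g init := by
  rw [pvCells, List.foldl_flatMap]
  congr 1
  funext d r
  rw [List.foldl_filterMap]
  congr 1
  funext d' c
  show (if (grid.getD r []).getD c 0 ≠ 0 then g d' ((grid.getD r []).getD c 0, r, c) else d') = _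
  generalize (grid.getD r []).getD c 0 = v
  by_cases h : v = 0 <;> simp [h]

-- B's rescan loop for one colour = a fold over that colour's row-major cells
theorem pvWrites (grid : List (List Int)) (val : Int) (hv : val ≠ 0)
    (W : List (List Int) → Nat × Nat → List (List Int)) (res0 : List (List Int)) :
    (List.range grid.length).foldl (fun res r =>
      (List.range (pvW grid)).foldl (fun res c =>
        if (grid.getD r []).getD c 0 = val then W res (r, c) else res) res) res0
    = (((pvCells grid).filter (fun p => p.1 == val)).map (fun x => x.2)).foldl W res0 := by
  rw [List.foldl_map, List.foldl_filter,
    ← pvFlatten grid (fun res p => if (p.1 == val) = true then W res p.2 else res) res0]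
  congr 1
  funext res r
  congr 1
  funext res c
  show (if (grid.getD r []).getD c 0 = val then W res (r, c) else res) = _
  generalize (grid.getD r []).getD c 0 = v
  by_cases h : v = 0
  · subst h; simp [Ne.symm hv]
  · by_cases he : v = val <;> simp [h, he, hv]

theorem pvMin?_cons (l : List Nat) : ∀ a : Nat,
    PySem.List.min? (a :: l) (fun x => x) = some (l.foldl Nat.min a) := by
  induction l with
  | nil => intro a; rfl
  | cons x t ih =>
    intro a
    have h1 : PySem.List.min? (a :: x :: t) (fun y => y)
        = PySem.List.min? (Nat.min a x :: t) (fun y => y) := by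
      simp only [PySem.List.min?, List.foldl_cons]
      have h2 : (if x < a then some x else some a) = some (Nat.min a x) := by
        by_cases h : x < a
        · rw [if_pos h]; exact congrArg some (Nat.min_eq_right h.le).symm
        · rw [if_neg h]; exact congrArg some (Nat.min_eq_left (by omega)).symm
      rw [h2]
    rw [h1, ih, List.foldl_cons]

theorem pvMax?_cons (l : List Nat) : ∀ a : Nat,
    PySem.List.max? (a :: l) (fun x => x) = some (l.foldl Nat.max a) := by
  induction l with
  | nil => intro a; rfl
  | cons x t ih =>
    intro a
    have h1 : PySem.List.max? (a :: x :: t) (fun y => y)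
        = PySem.List.max? (Nat.max a x :: t) (fun y => y) := by
      simp only [PySem.List.max?, List.foldl_cons]
      have h2 : (if a < x then some x else some a) = some (Nat.max a x) := by
        by_cases h : a < x
        · rw [if_pos h]; exact congrArg some (Nat.max_eq_right h.le).symm
        · rw [if_neg h]; exact congrArg some (Nat.max_eq_left (by omega)).symm
      rw [h2]
    rw [h1, ih, List.foldl_cons]

theorem pvMinR_append (cs : List (Nat × Nat)) (h : cs ≠ []) (p : Nat × Nat) :
    pvMinR (cs ++ [p]) = Nat.min (pvMinR cs) p.1 := by
  cases cs with
  | nil => exact absurd rfl h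
  | cons x t => simp [pvMinR, List.foldl_append]

theorem pvMaxR_append (cs : List (Nat × Nat)) (h : cs ≠ []) (p : Nat × Nat) :
    pvMaxR (cs ++ [p]) = Nat.max (pvMaxR cs) p.1 := by
  cases cs with
  | nil => exact absurd rfl h
  | cons x t => simp [pvMaxR, List.foldl_append]

-- B's bounds dict carries exactly the (min, max) row index of A's cell lists
theorem pvBuildRel (l : List (Int × Nat × Nat)) :
    ∀ (dA : PySem.Dict Int (List (Nat × Nat))) (dB : PySem.Dict Int (Nat × Nat)),
    dB.items = dA.items.map pvF →
    (∀ e ∈ dA.items, e.2 ≠ []) →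
    dA.keys.Nodup →
    (l.foldl pvStepB dB).items = (l.foldl pvStepA dA).items.map pvF ∧
    (∀ e ∈ (l.foldl pvStepA dA).items, e.2 ≠ []) := by
  induction l with
  | nil => intro dA dB h1 h2 h3; exact ⟨h1, h2⟩
  | cons p t ih =>
    intro dA dB h1 h2 h3
    simp only [List.foldl_cons]
    have hkeys : dB.keys = dA.keys := by
      simp only [PySem.Dict.keys, h1, List.map_map]; rfl
    have h3B : dB.keys.Nodup := by rw [hkeys]; exact h3
    by_cases hc : dA.contains p.1 = true
    · obtain ⟨cs, hA⟩ : ∃ cs, dA.get? p.1 = some cs := by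
        have h := PySem.Dict.contains_eq_isSome_get? dA p.1
        rw [hc] at h
        exact Option.isSome_iff_exists.mp h.symm
      have hmem : (p.1, cs) ∈ dA.items :=
        (PySem.Dict.get?_eq_some_iff_mem_items dA p.1 cs h3).mp hA
      have hcs_ne : cs ≠ [] := h2 _ hmem
      have hgetD : dA.getD p.1 [] = cs := PySem.Dict.getD_of_get?_eq_some dA [] hA
      have hBget : dB.get? p.1 = some (pvMinR cs, pvMaxR cs) := by
        refine (PySem.Dict.get?_eq_some_iff_mem_items dB p.1 _ h3B).mpr ?_
        rw [h1]
        exact List.mem_map.mpr ⟨(p.1, cs), hmem, rfl⟩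
      have hBgetD : dB.getD p.1 (p.2.1, p.2.1) = (pvMinR cs, pvMaxR cs) :=
        PySem.Dict.getD_of_get?_eq_some dB _ hBget
      have hcB : dB.contains p.1 = true := by
        rw [PySem.Dict.contains_eq_isSome_get?, hBget]; rfl
      have estepA : pvStepA dA p = dA.insert p.1 (cs ++ [(p.2.1, p.2.2)]) := by
        simp only [pvStepA, PySem.Dict.modify, hgetD]
      have estepB : pvStepB dB p
          = dB.insert p.1 (pvMinR (cs ++ [(p.2.1, p.2.2)]), pvMaxR (cs ++ [(p.2.1, p.2.2)])) := by
        simp only [pvStepB, PySem.Dict.modify, hBgetD, pvMinR_append cs hcs_ne,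
          pvMaxR_append cs hcs_ne]
      rw [estepA, estepB]
      refine ih _ _ ?_ ?_ ?_
      · rw [PySem.Dict.items_insert_of_contains _ _ hcB,
            PySem.Dict.items_insert_of_contains _ _ hc, h1, List.map_map, List.map_map]
        apply List.map_congr_left
        intro q hq
        by_cases hq1 : (q.1 == p.1) = true
        · simp only [Function.comp_apply, pvF, hq1, if_pos]
        · simp only [Function.comp_apply, pvF, hq1]
          simp
      · intro e he
        rw [PySem.Dict.items_insert_of_contains _ _ hc] at he
        obtain ⟨q, hq, hqe⟩ := List.mem_map.mp he
        by_cases hq1 : (q.1 == p.1) = true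
        · rw [if_pos hq1] at hqe
          rw [← hqe]
          simp
        · rw [if_neg hq1] at hqe
          exact hqe ▸ h2 q hq
      · exact PySem.Dict.nodup_keys_insert _ _ _ h3
    · have hc' : dA.contains p.1 = false := by simpa using hc
      have hcB : dB.contains p.1 = false := by
        have h := PySem.Dict.contains_eq_isSome_get? dB p.1
        have hn : dB.get? p.1 = none := by
          refine (PySem.Dict.get?_eq_none_iff_not_mem_keys dB p.1).mpr ?_
          rw [hkeys]
          intro hm
          exact (by simpa [hc'] using (PySem.Dict.contains_iff_mem_keys dA p.1).mpr hm)
        rw [hn] at h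
        exact h
      have hgetD : dA.getD p.1 [] = [] := PySem.Dict.getD_of_not_contains dA [] hc'
      have hBgetD : dB.getD p.1 (p.2.1, p.2.1) = (p.2.1, p.2.1) :=
        PySem.Dict.getD_of_not_contains dB _ hcB
      have estepA : pvStepA dA p = dA.insert p.1 [(p.2.1, p.2.2)] := by
        simp only [pvStepA, PySem.Dict.modify, hgetD]; rfl
      have estepB : pvStepB dB p = dB.insert p.1 (p.2.1, p.2.1) := by
        simp only [pvStepB, PySem.Dict.modify, hBgetD]
        congr 1
        simp
      rw [estepA, estepB]
      refine ih _ _ ?_ ?_ ?_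
      · rw [PySem.Dict.items_insert_of_not_contains _ _ hcB,
            PySem.Dict.items_insert_of_not_contains _ _ hc', h1, List.map_append]
        rfl
      · intro e he
        rw [PySem.Dict.items_insert_of_not_contains _ _ hc'] at he
        rcases List.mem_append.mp he with h' | h'
        · exact h2 e h'
        · simp at h'
          rw [h']
          simp
      · exact PySem.Dict.nodup_keys_insert _ _ _ h3

-- every recorded cell value is nonzero
theorem pvCells_fst_ne_zero (grid : List (List Int)) : ∀ p ∈ pvCells grid, p.1 ≠ 0 := by
  intro p hp
  rw [pvCells] at hp
  obtain ⟨r, -, hr⟩ := List.mem_flatMap.mp hp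
  obtain ⟨c, -, hc⟩ := List.mem_filterMap.mp hr
  dsimp only at hc
  split at hc
  · cases hc
    assumption
  · cases hc

theorem pvDictA_nodup (grid : List (List Int)) : (pvDictA grid).keys.Nodup :=
  PySem.Dict.nodup_keys_foldl_modify_key (pvCells grid) Prod.fst []
    (fun _ p => (· ++ [(p.2.1, p.2.2)])) PySem.Dict.empty (by simp)

theorem pvDictA_keys_sub (grid : List (List Int)) :
    ∀ k ∈ (pvDictA grid).keys, k ∈ (pvCells grid).map Prod.fst := by
  intro k hk
  have h : (pvDictA grid).keys
      = PySem.Set.update PySem.Dict.empty.keys ((pvCells grid).map Prod.fst) :=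
    PySem.Dict.keys_foldl_modify_key (pvCells grid) Prod.fst []
      (fun _ p => (· ++ [(p.2.1, p.2.2)])) PySem.Dict.empty
  rw [h] at hk
  rcases (PySem.Set.mem_update _ _ _).mp hk with h' | h'
  · simp [PySem.Dict.keys_empty] at h'
  · exact h'

theorem pvDictA_getD (grid : List (List Int)) (k : Int) :
    (pvDictA grid).getD k [] = ((pvCells grid).filter (fun p => p.1 == k)).map (fun x => x.2) := by
  have h : (pvDictA grid).getD k []
      = PySem.Dict.empty.getD k [] ++ ((pvCells grid).filter (fun p => p.1 == k)).map (fun x => x.2) :=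
    PySem.Dict.getD_foldl_modify_append (pvCells grid) PySem.Dict.empty k
  rw [h]
  simp [PySem.Dict.getD_empty]

-- per-entry agreement of the two placement bodies
theorem pvBody_eq (grid : List (List Int)) (e : Int × List (Nat × Nat))
    (he : e ∈ (pvDictA grid).items) (hne : e.2 ≠ []) (acc : List (List Int)) :
    pvBodyA grid acc e = pvBodyB grid acc (pvF e) := by
  obtain ⟨k, cs⟩ := e
  have hk : k ∈ (pvDictA grid).keys := List.mem_map.mpr ⟨(k, cs), he, rfl⟩
  obtain ⟨p, hp, hpk⟩ := List.mem_map.mp (pvDictA_keys_sub grid k hk)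
  have hv : k ≠ 0 := hpk ▸ pvCells_fst_ne_zero grid p hp
  have hcs : cs = ((pvCells grid).filter (fun p => p.1 == k)).map (fun x => x.2) := by
    have h1 : (pvDictA grid).getD k [] = cs :=
      PySem.Dict.getD_of_mem_items (pvDictA grid) he (pvDictA_nodup grid) []
    rw [← h1, pvDictA_getD]
  have hne' : cs ≠ [] := hne
  have hmin : (PySem.List.min? (cs.map Prod.fst) (fun x => x)).getD 0 = pvMinR cs := by
    cases cs with
    | nil => exact absurd rfl hne'
    | cons x t => rw [List.map_cons, pvMin?_cons]; rfl
  have hmax : (PySem.List.max? (cs.map Prod.fst) (fun x => x)).getD 0 = pvMaxR cs := by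
    cases cs with
    | nil => exact absurd rfl hne'
    | cons x t => rw [List.map_cons, pvMax?_cons]; rfl
  simp only [pvBodyA, pvBodyB, pvF, hmin, hmax]
  rw [hcs]
  exact (pvWrites grid k hv _ acc).symm

-- ===== VERDICT (by name: the statement is the Claim_ definition above) =====
theorem transform_spec : Claim_equal_transform := by
  intro grid _ _
  unfold Spec_transform
  have hccA : transform grid = (pvDictA grid).items.foldl (pvBodyA grid)
      (List.replicate grid.length (List.replicate (pvW grid) (0 : Int))) := by
    have h := pvFlatten grid pvStepA PySem.Dict.empty
    exact congrArg (fun d => d.items.foldl (pvBodyA grid)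
      (List.replicate grid.length (List.replicate (pvW grid) (0 : Int)))) h
  have hrel := pvBuildRel (pvCells grid) PySem.Dict.empty PySem.Dict.empty
    rfl
    (by intro e he; cases he)
    (by rw [PySem.Dict.keys_empty]; exact List.nodup_nil)
  have hccB : transform_alt grid = ((pvCells grid).foldl pvStepB PySem.Dict.empty).items.foldl
      (pvBodyB grid) (List.replicate grid.length (List.replicate (pvW grid) (0 : Int))) := by
    have h := pvFlatten grid pvStepB PySem.Dict.empty
    exact congrArg (fun d => d.items.foldl (pvBodyB grid)
      (List.replicate grid.length (List.replicate (pvW grid) (0 : Int)))) h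
  rw [hrel.1] at hccB
  rw [hccA, hccB, List.foldl_map]
  exact PySem.List.foldl_congr_mem _ _ _ _
    (fun acc e hme => pvBody_eq grid e hme (hrel.2 e hme) acc)
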